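-- pv_equiv track=rewrite | github.com/n-luca13/Esami | Programmazione Avanzata - Python/main-old.py | check_full_pattern
-- ===== SOURCE A (Python) =====
-- density_coords = []
--
-- def check_full_pattern(density_coords, pattern, max_dens_row, b_matrix):
--     """ Ricerca del pattern completo per ciascuna occorrenza della lista più densa """
--     results = []
--     if density_coords:
--         for c in density_coords:
--             c_result = []
--             for row in range(0, len(pattern)):
--                 row_index = c[0] - max_dens_row[0] + row
--                 col_index = c[1] - max_dens_row[1] + 1
--                 c_result.append((row_index, col_index))
--                 if row_index == c[0]:
--                     continue
--                 if not check_row(b_matrix, pattern[row], row_index, col_index):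
--                     c_result.clear()
--                     break
--             if c_result:
--                 results.append(c_result)
--     return results
--
-- def check_row(b_matrix, pattern, row_index, col_index, pattern_index=0):
--     """
--     Ricerca singola riga/lista del pattern. Funzione richiamata da checkFullPattern (v. dopo)
--     :param b_matrix:
--         matrice di ricerca
--     :param pattern:
--         singola riga/lista del pattern, che rappresenta la lunghezza di ciascuna alternanza di 0 e 1; es. [0,1,1,3] = zero 1, un 1, uno 0, tre 1
--     :param row_index:
--         indice di riga nella matrice di ricerca
--     :param col_index:
--         indice di colonna nella matrice di ricerca
--     :param pattern_index:
--         indice nella riga/lista del pattern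
--         incrementa progressivamente di 1
--     :return:
--         True/False
--     """
--     # Se ho finito di cercare la singola riga/lista del pattern
--     if pattern_index >= len(pattern):
--         return True
--     # Se cerco 0
--     if pattern_index == 0 or pattern_index % 2 == 0:
--         col_index = col_index + pattern[pattern_index]
--     else:
--         # Se cerco 1
--         for ones in range(0, pattern[pattern_index]):
--             # Se trovo 0 nella matrice di ricerca, smetto di cercare il pattern
--             if b_matrix[row_index][col_index] == 0:
--                 return False
--             # Se trovo 1, mi sposto in avanti di una colonna nella matrice di ricerca
--             col_index += 1
--     # Rilancio la funzione aumentando il pattern_index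
--     pattern_index += 1
--     return check_row(b_matrix, pattern, row_index, col_index, pattern_index)
-- ===== SOURCE B (Python) =====
-- def _row_ok(b_matrix, prow, row_index, col_index):
--     col = col_index
--     for k, run in enumerate(prow):
--         if k % 2 == 0:
--             col += run
--         else:
--             for _ in range(run):
--                 if b_matrix[row_index][col] == 0:
--                     return False
--                 col += 1
--     return True
--
--
-- def check_full_pattern(density_coords, pattern, max_dens_row, b_matrix):
--     results = []
--     dr, dc = max_dens_row
--     for r0, c0 in density_coords:
--         base_row = r0 - dr
--         col = c0 - dc + 1
--         if pattern and all(
--             base_row + i == r0 or _row_ok(b_matrix, prow, base_row + i, col)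
--             for i, prow in enumerate(pattern)
--         ):
--             results.append([(base_row + i, col) for i in range(len(pattern))])
--     return results
-- ===== Notes on version B (the rewrite author's own statement) =====
-- stated objective: simpler
-- what changed: A's tail-recursive check_row with an index parameter becomes a single iterative pass over the pattern row, and A's append/clear-and-break accumulation of c_result becomes a short-circuit all() over the enumerated pattern rows followed by a direct comprehension of the coordinate list.
-- outside the precondition, e.g. on check_full_pattern([(0, 0)], [[0, 2]], (1, 0), [[1, 0]]): A returns [], B returns []
import Mathlib
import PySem

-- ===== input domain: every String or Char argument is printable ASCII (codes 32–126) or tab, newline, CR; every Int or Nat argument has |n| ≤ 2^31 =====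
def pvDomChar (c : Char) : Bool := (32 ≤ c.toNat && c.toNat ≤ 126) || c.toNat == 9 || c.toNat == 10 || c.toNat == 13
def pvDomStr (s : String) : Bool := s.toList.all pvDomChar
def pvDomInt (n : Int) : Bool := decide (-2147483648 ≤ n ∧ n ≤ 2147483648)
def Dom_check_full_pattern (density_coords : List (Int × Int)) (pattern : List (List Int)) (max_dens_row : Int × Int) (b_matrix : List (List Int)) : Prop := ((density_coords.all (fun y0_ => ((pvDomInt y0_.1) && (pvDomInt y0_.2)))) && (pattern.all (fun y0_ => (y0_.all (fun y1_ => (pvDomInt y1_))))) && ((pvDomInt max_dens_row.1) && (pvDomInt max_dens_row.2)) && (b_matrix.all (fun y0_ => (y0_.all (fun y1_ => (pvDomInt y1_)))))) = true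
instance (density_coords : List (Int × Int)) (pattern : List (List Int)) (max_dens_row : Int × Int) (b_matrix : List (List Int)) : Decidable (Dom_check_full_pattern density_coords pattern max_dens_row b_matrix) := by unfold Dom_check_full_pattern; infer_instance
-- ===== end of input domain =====

-- B rewrites A's tail-recursive check_row as an iterative fold over the pattern row and replaces
-- A's append/clear/break accumulation by a short-circuit all() check plus a direct comprehension
-- of the coordinate list (objective: simpler/alternative decomposition; same asymptotic cost).
-- Equality is about return values; neither program mutates its arguments observably.

-- ===== PORT A =====
-- b_matrix[r][c]: both Pythons read the same cells; out-of-range (IndexError) is excluded by Pre_,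
-- there the port returns the default 0.
def pvCell (b_matrix : List (List Int)) (r c : Int) : Int :=
  (PySem.List.pyGet? ((PySem.List.pyGet? b_matrix r).getD []) c).getD 0

-- 'for ones in range(0, p): if b[r][col]==0: return False; col += 1' — identical inner loop text
-- in A's check_row and B's _row_ok; none = early 'return False', some col' = loop finished.
def pvScanOnes (b_matrix : List (List Int)) (row_index : Int) : Int → Nat → Option Int
  | col, 0 => some col
  | col, n + 1 =>
      if pvCell b_matrix row_index col == 0 then none
      else pvScanOnes b_matrix row_index (col + 1) n

-- A's check_row, tail recursion on pattern_index; fuel = pattern.length - pattern_index only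
-- makes the recursion structural, fuel = 0 is exactly Python's 'pattern_index >= len(pattern)'.
def checkRowGo (b_matrix : List (List Int)) (pattern : List Int) (row_index : Int) :
    Nat → Int → Nat → Bool
  | 0, _, _ => true
  | fuel + 1, col_index, pattern_index =>
      let p := pattern.getD pattern_index 0
      if pattern_index % 2 == 0 then
        checkRowGo b_matrix pattern row_index fuel (col_index + p) (pattern_index + 1)
      else
        match pvScanOnes b_matrix row_index col_index p.toNat with
        | none => false
        | some col' => checkRowGo b_matrix pattern row_index fuel col' (pattern_index + 1)

def check_row_A (b_matrix : List (List Int)) (pattern : List Int) (row_index : Int)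
    (col_index : Int) (pattern_index : Nat) : Bool :=
  checkRowGo b_matrix pattern row_index (pattern.length - pattern_index) col_index pattern_index

-- A's 'for row in range(0, len(pattern))' with c_result append / clear-and-break
-- (fuel = remaining rows, again only to make the loop structural).
def rowsGoA (pattern : List (List Int)) (b_matrix : List (List Int)) (c : Int × Int)
    (mdr : Int × Int) : Nat → Nat → List (Int × Int) → List (Int × Int)
  | 0, _, acc => acc
  | fuel + 1, row, acc =>
      let row_index := c.1 - mdr.1 + (row : Int)
      let col_index := c.2 - mdr.2 + 1
      let acc' := acc ++ [(row_index, col_index)]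
      if row_index == c.1 then rowsGoA pattern b_matrix c mdr fuel (row + 1) acc'
      else if check_row_A b_matrix (pattern.getD row []) row_index col_index 0 then
        rowsGoA pattern b_matrix c mdr fuel (row + 1) acc'
      else []

def check_full_pattern (density_coords : List (Int × Int)) (pattern : List (List Int)) (max_dens_row : Int × Int) (b_matrix : List (List Int)) : List (List (Int × Int)) :=
  if density_coords.isEmpty then []
  else
    density_coords.foldl (fun results c =>
      let c_result := rowsGoA pattern b_matrix c max_dens_row pattern.length 0 []
      if c_result.isEmpty then results else results ++ [c_result]) []

-- ===== PORT B =====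
-- B's _row_ok: one iterative pass over the runs with index k and running column col.
def rowOkGo (b_matrix : List (List Int)) (row_index : Int) :
    List Int → Nat → Int → Bool
  | [], _, _ => true
  | run :: rest, k, col =>
      if k % 2 == 0 then rowOkGo b_matrix row_index rest (k + 1) (col + run)
      else
        match pvScanOnes b_matrix row_index col run.toNat with
        | none => false
        | some col' => rowOkGo b_matrix row_index rest (k + 1) col'

def row_ok (b_matrix : List (List Int)) (prow : List Int) (row_index col_index : Int) : Bool :=
  rowOkGo b_matrix row_index prow 0 col_index

-- B's short-circuit 'all(base_row + i == r0 or _row_ok(...) for i, prow in enumerate(pattern))'.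
def allRowsOk (b_matrix : List (List Int)) (r0 base_row col : Int) :
    List (List Int) → Nat → Bool
  | [], _ => true
  | prow :: rest, i =>
      (base_row + (i : Int) == r0 || row_ok b_matrix prow (base_row + (i : Int)) col) &&
        allRowsOk b_matrix r0 base_row col rest (i + 1)

def check_full_pattern_alt (density_coords : List (Int × Int)) (pattern : List (List Int)) (max_dens_row : Int × Int) (b_matrix : List (List Int)) : List (List (Int × Int)) :=
  density_coords.foldl (fun results c =>
    let base_row := c.1 - max_dens_row.1
    let col := c.2 - max_dens_row.2 + 1
    if !pattern.isEmpty && allRowsOk b_matrix c.1 base_row col pattern 0 then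
      results ++ [(List.range pattern.length).map (fun i => (base_row + (i : Int), col))]
    else results) []

-- ===== PRECONDITION & SPEC =====
-- Column position of the k-th run of a pattern row started at column s: runs at even positions
-- shift the column, runs at odd positions advance it by one per consumed 1 (never backwards).
def pvPos (prow : List Int) (k : Nat) (s : Int) : Int :=
  s + (((prow.take k).zipIdx).map (fun e => if e.2 % 2 = 0 then e.1 else max e.1 0)).sum

-- Pre_ excludes the inputs on which a b_matrix access could raise IndexError: for each checked
-- (non-skipped) pattern row that reads at all (some positive run at an odd position), its row
-- index and the column window [pvPos, pvPos + run) of each positive odd-position run must be a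
-- valid (possibly negative, Python-style) index; because A may stop at a 0 cell or at a failed
-- earlier row before reaching the out-of-range access, this also excludes some inputs on which A
-- still returns — B returns the same value there.
def Pre_check_full_pattern (density_coords : List (Int × Int)) (pattern : List (List Int)) (max_dens_row : Int × Int) (b_matrix : List (List Int)) : Prop :=
  ∀ c ∈ density_coords, ∀ ip ∈ pattern.zipIdx,
    (c.1 - max_dens_row.1 + (ip.2 : Int) = c.1) ∨
    (((∃ ek ∈ ip.1.zipIdx, ek.2 % 2 = 1 ∧ 0 < ek.1) →
        PySem.Raise.InRange b_matrix.length (c.1 - max_dens_row.1 + (ip.2 : Int))) ∧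
     ∀ ek ∈ ip.1.zipIdx, ek.2 % 2 = 1 → 0 < ek.1 →
       PySem.Raise.InRange
         ((PySem.List.pyGet? b_matrix (c.1 - max_dens_row.1 + (ip.2 : Int))).getD []).length
         (pvPos ip.1 ek.2 (c.2 - max_dens_row.2 + 1)) ∧
       PySem.Raise.InRange
         ((PySem.List.pyGet? b_matrix (c.1 - max_dens_row.1 + (ip.2 : Int))).getD []).length
         (pvPos ip.1 ek.2 (c.2 - max_dens_row.2 + 1) + ek.1 - 1))
instance (density_coords : List (Int × Int)) (pattern : List (List Int)) (max_dens_row : Int × Int) (b_matrix : List (List Int)) : Decidable (Pre_check_full_pattern density_coords pattern max_dens_row b_matrix) := by unfold Pre_check_full_pattern; infer_instance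

def pvWitness_check_full_pattern : (List (Int × Int)) × List (List Int) × (Int × Int) × List (List Int) :=
  ([(1, 1)], [[0, 1], [0, 1]], (1, 0), [[1, 1, 1], [1, 1, 1]])

def Spec_check_full_pattern (density_coords : List (Int × Int)) (pattern : List (List Int)) (max_dens_row : Int × Int) (b_matrix : List (List Int)) (out : List (List (Int × Int))) : Prop := out = check_full_pattern_alt density_coords pattern max_dens_row b_matrix
instance (density_coords : List (Int × Int)) (pattern : List (List Int)) (max_dens_row : Int × Int) (b_matrix : List (List Int)) (out : List (List (Int × Int))) : Decidable (Spec_check_full_pattern density_coords pattern max_dens_row b_matrix out) := by unfold Spec_check_full_pattern; infer_instance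

-- ===== CLAIM (what is proved, stated in full; the proofs are below) =====
def Claim_equal_check_full_pattern : Prop := ∀ (density_coords : List (Int × Int)) (pattern : List (List Int)) (max_dens_row : Int × Int) (b_matrix : List (List Int)), Dom_check_full_pattern density_coords pattern max_dens_row b_matrix → Pre_check_full_pattern density_coords pattern max_dens_row b_matrix → Spec_check_full_pattern density_coords pattern max_dens_row b_matrix (check_full_pattern density_coords pattern max_dens_row b_matrix)

-- ===== LEMMAS AND PROOFS =====

lemma checkRowGo_eq_rowOkGo (b_matrix : List (List Int)) (pattern : List Int) (ri : Int) :
    ∀ n k col, pattern.length - k = n →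
      checkRowGo b_matrix pattern ri n col k = rowOkGo b_matrix ri (pattern.drop k) k col := by
  intro n
  induction n with
  | zero =>
      intro k col h
      have hk : pattern.length ≤ k := by omega
      rw [List.drop_eq_nil_of_le hk]
      rfl
  | succ m ih =>
      intro k col h
      have hk : k < pattern.length := by omega
      have hdrop : pattern.drop k = pattern[k] :: pattern.drop (k + 1) :=
        List.drop_eq_getElem_cons hk
      have hgetD : pattern.getD k 0 = pattern[k] := by
        rw [List.getD_eq_getElem?_getD, List.getElem?_eq_getElem hk]; rfl
      rw [hdrop]
      simp only [checkRowGo, rowOkGo, hgetD]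
      by_cases hpar : k % 2 = 0
      · simp only [hpar]
        simp only [show ((0 : Nat) == 0) = true from rfl, if_true]
        exact ih (k + 1) (col + pattern[k]) (by omega)
      · have hb : (k % 2 == 0) = false := by simpa using hpar
        simp only [hb, Bool.false_eq_true, if_false]
        cases hscan : pvScanOnes b_matrix ri col (pattern[k]).toNat with
        | none => rfl
        | some col' => exact ih (k + 1) col' (by omega)

lemma rowsGoA_eq (pattern : List (List Int)) (b_matrix : List (List Int)) (c mdr : Int × Int) :
    ∀ n row acc, pattern.length - row = n →
      rowsGoA pattern b_matrix c mdr n row acc =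
        if allRowsOk b_matrix c.1 (c.1 - mdr.1) (c.2 - mdr.2 + 1) (pattern.drop row) row then
          acc ++ (List.range' row (pattern.length - row)).map
            (fun i => (c.1 - mdr.1 + (i : Int), c.2 - mdr.2 + 1))
        else [] := by
  intro n
  induction n with
  | zero =>
      intro row acc h
      have hk : pattern.length ≤ row := by omega
      rw [List.drop_eq_nil_of_le hk]
      simp [rowsGoA, allRowsOk, Nat.sub_eq_zero_of_le hk]
  | succ m ih =>
      intro row acc h
      have hk : row < pattern.length := by omega
      have hdrop : pattern.drop row = pattern[row] :: pattern.drop (row + 1) :=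
        List.drop_eq_getElem_cons hk
      have hgetD : pattern.getD row [] = pattern[row] := by
        rw [List.getD_eq_getElem?_getD, List.getElem?_eq_getElem hk]; rfl
      have hrange : List.range' row (pattern.length - row) =
          row :: List.range' (row + 1) (pattern.length - (row + 1)) := by
        have h1 : pattern.length - row = (pattern.length - (row + 1)) + 1 := by omega
        rw [h1, List.range'_succ]
      rw [hdrop]
      simp only [rowsGoA, allRowsOk, hgetD]
      have hcheck : check_row_A b_matrix pattern[row] (c.1 - mdr.1 + (row : Int))
          (c.2 - mdr.2 + 1) 0 =
          row_ok b_matrix pattern[row] (c.1 - mdr.1 + (row : Int)) (c.2 - mdr.2 + 1) := by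
        unfold check_row_A row_ok
        exact checkRowGo_eq_rowOkGo b_matrix pattern[row] _ _ 0 _ (by omega)
      by_cases hskip : ((c.1 - mdr.1 + (row : Int)) == c.1) = true
      · simp only [hskip, if_true, Bool.true_or, Bool.true_and]
        rw [ih (row + 1) (acc ++ [(c.1 - mdr.1 + (row : Int), c.2 - mdr.2 + 1)]) (by omega)]
        by_cases hall : allRowsOk b_matrix c.1 (c.1 - mdr.1) (c.2 - mdr.2 + 1)
            (pattern.drop (row + 1)) (row + 1) = true
        · simp [hall, hrange]
        · simp [hall]
      · have hskip' : ((c.1 - mdr.1 + (row : Int)) == c.1) = false := by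
          simpa using hskip
        simp only [hskip', Bool.false_eq_true, if_false, Bool.false_or]
        rw [hcheck]
        by_cases hok : row_ok b_matrix pattern[row] (c.1 - mdr.1 + (row : Int))
            (c.2 - mdr.2 + 1) = true
        · simp only [hok, if_true, Bool.true_and]
          rw [ih (row + 1) (acc ++ [(c.1 - mdr.1 + (row : Int), c.2 - mdr.2 + 1)]) (by omega)]
          by_cases hall : allRowsOk b_matrix c.1 (c.1 - mdr.1) (c.2 - mdr.2 + 1)
              (pattern.drop (row + 1)) (row + 1) = true
          · simp [hall, hrange]
          · simp [hall]
        · simp [hok]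

lemma step_eq (pattern : List (List Int)) (b_matrix : List (List Int)) (mdr : Int × Int)
    (results : List (List (Int × Int))) (c : Int × Int) :
    (let c_result := rowsGoA pattern b_matrix c mdr pattern.length 0 []
     if c_result.isEmpty then results else results ++ [c_result]) =
    (if !pattern.isEmpty && allRowsOk b_matrix c.1 (c.1 - mdr.1) (c.2 - mdr.2 + 1) pattern 0 then
       results ++ [(List.range pattern.length).map
         (fun i => (c.1 - mdr.1 + (i : Int), c.2 - mdr.2 + 1))]
     else results) := by
  have hmain := rowsGoA_eq pattern b_matrix c mdr pattern.length 0 [] (by omega)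
  simp only [List.drop_zero, Nat.sub_zero] at hmain
  simp only []
  rw [hmain]
  by_cases hall : allRowsOk b_matrix c.1 (c.1 - mdr.1) (c.2 - mdr.2 + 1) pattern 0 = true
  · simp only [hall, if_true, Bool.and_true, List.nil_append, List.range_eq_range']
    cases pattern with
    | nil => simp
    | cons p ps =>
        simp [List.isEmpty_iff]
        exact ⟨0, by omega⟩
  · simp [hall]

-- ===== VERDICT (by name: the statement is the Claim_ definition above) =====
theorem check_full_pattern_spec : Claim_equal_check_full_pattern := by
  intro density_coords pattern max_dens_row b_matrix _ _
  unfold Spec_check_full_pattern check_full_pattern check_full_pattern_alt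
  cases hdc : density_coords with
  | nil => simp
  | cons d ds =>
      simp only [List.isEmpty_cons, if_false, Bool.false_eq_true]
      apply PySem.List.foldl_congr_mem
      intro acc x _
      exact step_eq pattern b_matrix max_dens_row acc x
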